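-- pv_equiv track=rewrite | github.com/sebastienlapierre/oio-sds | tools/oio-election-smudge.py | hash_tree
-- ===== SOURCE A (Python) =====
-- import itertools
--
-- hexa = '0123456789ABCDEF'
--
-- def hash_tokens (w):
--     if w == 0:
--         return []
--     return itertools.product(hexa, repeat=w)
--
-- def hash_tree (d0, w):
--     tokens = [''.join(x) for x in hash_tokens(w)]
--
--     def depth(d):
--         if d == 0:
--             return []
--         return itertools.product(tokens, repeat=d)
--     for x in depth(d0):
--         yield '/'.join(x)
-- ===== SOURCE B (Python) =====
-- hexa = '0123456789ABCDEF'
--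
-- def hash_tree(d0, w):
--     if d0 < 0 or w < 0:
--         raise ValueError("depth and width must be non-negative")
--     if w == 0:
--         return
--     tokens = ['']
--     for _ in range(w):
--         tokens = [t + c for t in tokens for c in hexa]
--
--     def build(d):
--         if d == 1:
--             yield from tokens
--         elif d > 1:
--             for t in tokens:
--                 for rest in build(d - 1):
--                     yield t + '/' + rest
--
--     yield from build(d0)
-- ===== Notes on version B (the rewrite author's own statement) =====
-- stated objective: alternative
-- what changed: Replaces itertools.product for both the hex tokens and the depth-d0 paths with an incremental list-comprehension token builder and a recursive generator that emits paths level by level (outer token slowest), joining with '/' as it recurses instead of building tuples and joining afterwards.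
import Mathlib
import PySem

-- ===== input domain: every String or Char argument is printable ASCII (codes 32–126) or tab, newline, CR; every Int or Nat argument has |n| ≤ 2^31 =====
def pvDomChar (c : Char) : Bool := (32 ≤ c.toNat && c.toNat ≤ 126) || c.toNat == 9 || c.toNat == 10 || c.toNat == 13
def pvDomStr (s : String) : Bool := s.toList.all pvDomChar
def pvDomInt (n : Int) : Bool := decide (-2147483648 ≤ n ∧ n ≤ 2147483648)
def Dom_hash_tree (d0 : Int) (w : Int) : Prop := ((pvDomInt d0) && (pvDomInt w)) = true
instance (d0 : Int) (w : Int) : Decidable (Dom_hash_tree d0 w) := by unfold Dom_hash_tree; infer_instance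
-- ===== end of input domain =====

-- B replaces both itertools.product calls by an incremental token builder and a recursive
-- level-by-level path generator that joins with '/' as it recurses (alternative decomposition,
-- no speed claim). Python strings are represented as List Char (PySem.Chars), converted to
-- String only at the output boundary.

-- ===== PORT A =====
def pvHexa : List Char := "0123456789ABCDEF".toList

-- itertools.product(pool, repeat=n) in product order (leftmost coordinate varies slowest)
def pyProduct {α : Type} (pool : List α) : Nat → List (List α)
  | 0 => [[]]
  | n + 1 => pool.flatMap (fun y => (pyProduct pool n).map (fun xs => y :: xs))

-- hash_tokens: the ''.join of a tuple of single chars is exactly that char list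
def hash_tokens (w : Int) : List (List Char) :=
  if w = 0 then [] else pyProduct pvHexa w.toNat

def hash_tree (d0 : Int) (w : Int) : List String :=
  (if d0 = 0 then [] else pyProduct (hash_tokens w) d0.toNat).map
    (fun xs => String.ofList (PySem.Chars.join ['/'] xs))

-- ===== PORT B =====
-- tokens = ['']; for _ in range(w): tokens = [t + c for t in tokens for c in hexa]
def pvTokensB (w : Nat) : List (List Char) :=
  (List.range w).foldl
    (fun ts _ => ts.flatMap (fun t => pvHexa.map (fun c => t ++ [c]))) [[]]

-- build(d): d == 1 → tokens; d > 1 → t + '/' + rest for t in tokens, rest in build(d-1)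
def pvBuildB (tokens : List (List Char)) : Nat → List (List Char)
  | 0 => []
  | 1 => tokens
  | n + 2 => tokens.flatMap (fun t => (pvBuildB tokens (n + 1)).map (fun rest => t ++ '/' :: rest))

def hash_tree_alt (d0 : Int) (w : Int) : List String :=
  if d0 < 0 ∨ w < 0 then []        -- B raises ValueError here (outside Pre_)
  else if w = 0 then []
  else (pvBuildB (pvTokensB w.toNat) d0.toNat).map String.ofList

-- ===== PRECONDITION & SPEC =====
-- A raises ValueError (itertools.product with negative repeat) when d0 < 0 or w < 0.
def Pre_hash_tree (d0 : Int) (w : Int) : Prop := 0 ≤ d0 ∧ 0 ≤ w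
instance (d0 : Int) (w : Int) : Decidable (Pre_hash_tree d0 w) := by
  unfold Pre_hash_tree; infer_instance

def pvWitness_hash_tree : Int × Int := (2, 1)

def Spec_hash_tree (d0 : Int) (w : Int) (out : List String) : Prop := out = hash_tree_alt d0 w
instance (d0 : Int) (w : Int) (out : List String) : Decidable (Spec_hash_tree d0 w out) := by
  unfold Spec_hash_tree; infer_instance

-- ===== CLAIM (what is proved, stated in full; the proofs are below) =====
def Claim_equal_hash_tree : Prop :=
  ∀ (d0 : Int) (w : Int), Dom_hash_tree d0 w → Pre_hash_tree d0 w →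
    Spec_hash_tree d0 w (hash_tree d0 w)

-- ===== LEMMAS AND PROOFS =====

theorem pyProduct_nil {α : Type} (n : Nat) : pyProduct ([] : List α) (n + 1) = [] := by
  simp [pyProduct]

-- snoc-expansion of the product (B's token loop grows tuples on the right)
theorem pvFlatMapCongr {a b : Type} {l : List a} {f g : a → List b}
    (h : ∀ x ∈ l, f x = g x) : l.flatMap f = l.flatMap g := by
  induction l with
  | nil => rfl
  | cons x t ih => simp_all [List.flatMap_cons]

theorem pvFlatMapSingleton {a : Type} (l : List a) :
    l.flatMap (fun y => [[y]]) = l.map (fun y => [y]) := by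
  induction l <;> simp_all

-- snoc-expansion of the product (B's token loop grows tuples on the right)
theorem pyProduct_succ_snoc {α : Type} (pool : List α) (n : Nat) :
    pyProduct pool (n + 1) = (pyProduct pool n).flatMap (fun t => pool.map (fun c => t ++ [c])) := by
  induction n with
  | zero => simp [pyProduct, pvFlatMapSingleton]
  | succ n ih =>
    calc pyProduct pool (n + 2)
        = pool.flatMap (fun y => (pyProduct pool (n + 1)).map (fun xs => y :: xs)) := rfl
      _ = pool.flatMap (fun y =>
            ((pyProduct pool n).flatMap (fun t => pool.map (fun c => t ++ [c]))).map
              (fun xs => y :: xs)) := by rw [ih]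
      _ = (pyProduct pool (n + 1)).flatMap (fun t => pool.map (fun c => t ++ [c])) := by
            simp [pyProduct, List.map_flatMap, List.flatMap_map, List.flatMap_assoc,
              Function.comp_def]

theorem pvTokensB_eq (n : Nat) : pvTokensB n = pyProduct pvHexa n := by
  induction n with
  | zero => simp [pvTokensB, pyProduct]
  | succ n ih =>
    rw [pyProduct_succ_snoc, ← ih]
    simp [pvTokensB, List.range_succ]

theorem pyProduct_succ_ne_nil {α : Type} {pool : List α} {n : Nat} :
    ∀ xs ∈ pyProduct pool (n + 1), xs ≠ [] := by
  intro xs hxs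
  simp only [pyProduct, List.mem_flatMap, List.mem_map] at hxs
  obtain ⟨y, -, t, -, rfl⟩ := hxs
  simp

theorem pvBuildB_eq (tokens : List (List Char)) (n : Nat) :
    pvBuildB tokens (n + 1) = (pyProduct tokens (n + 1)).map (PySem.Chars.join ['/']) := by
  induction n with
  | zero =>
    show tokens = _
    simp [pyProduct, pvFlatMapSingleton, List.map_map, Function.comp_def,
      PySem.Chars.join_singleton]
  | succ n ih =>
    have hb : pvBuildB tokens (n + 2)
        = tokens.flatMap (fun t => (pvBuildB tokens (n + 1)).map (fun rest => t ++ '/' :: rest)) :=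
      rfl
    have hp : pyProduct tokens (n + 2)
        = tokens.flatMap (fun y => (pyProduct tokens (n + 1)).map (fun xs => y :: xs)) := rfl
    rw [hb, ih, hp, List.map_flatMap]
    refine pvFlatMapCongr ?_
    intro t _
    rw [List.map_map, List.map_map]
    apply List.map_congr_left
    intro xs hxs
    obtain ⟨a, l, rfl⟩ := List.exists_cons_of_ne_nil (pyProduct_succ_ne_nil xs hxs)
    simp [PySem.Chars.join_cons_cons]

-- ===== VERDICT (by name: the statement is the Claim_ definition above) =====
theorem hash_tree_spec : Claim_equal_hash_tree := by
  intro d0 w _ hpre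
  obtain ⟨hd0, hw⟩ := hpre
  unfold Spec_hash_tree hash_tree hash_tree_alt hash_tokens
  rw [if_neg (by omega : ¬(d0 < 0 ∨ w < 0))]
  by_cases hw0 : w = 0
  · rw [if_pos hw0, if_pos hw0]
    by_cases hd : d0 = 0
    · rw [if_pos hd]; rfl
    · obtain ⟨m, hm⟩ : ∃ m, d0.toNat = m + 1 := ⟨d0.toNat - 1, by omega⟩
      rw [if_neg hd, hm, pyProduct_nil]; rfl
  · rw [if_neg hw0, if_neg hw0, pvTokensB_eq]
    by_cases hd : d0 = 0
    · subst hd; rw [if_pos rfl]; rfl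
    · obtain ⟨m, hm⟩ : ∃ m, d0.toNat = m + 1 := ⟨d0.toNat - 1, by omega⟩
      rw [if_neg hd, hm, pvBuildB_eq, List.map_map]
      simp [Function.comp_def]

theorem hash_tree_pre_witness :
    Dom_hash_tree pvWitness_hash_tree.1 pvWitness_hash_tree.2 ∧
      Pre_hash_tree pvWitness_hash_tree.1 pvWitness_hash_tree.2 := by decide
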